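-- pv_equiv track=rewrite | github.com/KotaroW/fun-py | config_gen.py | mask_password
-- ===== SOURCE A (Python) =====
-- def mask_password(pwd):
-- 	masked = ""
--
-- 	for index in range(0, len(pwd)):
-- 		if index % 2 == 1:
-- 			masked = masked + "*"
-- 		else:
-- 			masked = masked + pwd[index]
--
-- 	return masked
-- ===== SOURCE B (Python) =====
-- def mask_password(pwd):
--     out = []
--     i = 0
--     n = len(pwd)
--     while i + 1 < n:
--         out.append(pwd[i])
--         out.append('*')
--         i += 2
--     if i < n:
--         out.append(pwd[i])
--     return ''.join(out)
-- ===== Notes on version B (the rewrite author's own statement) =====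
-- stated objective: alternative
-- what changed: Replaces the per-index parity branch with a loop that consumes two characters per step (emit char then '*'), handling a single leftover character after the loop; no parity test, no string concatenation in the loop.
import Mathlib
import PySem

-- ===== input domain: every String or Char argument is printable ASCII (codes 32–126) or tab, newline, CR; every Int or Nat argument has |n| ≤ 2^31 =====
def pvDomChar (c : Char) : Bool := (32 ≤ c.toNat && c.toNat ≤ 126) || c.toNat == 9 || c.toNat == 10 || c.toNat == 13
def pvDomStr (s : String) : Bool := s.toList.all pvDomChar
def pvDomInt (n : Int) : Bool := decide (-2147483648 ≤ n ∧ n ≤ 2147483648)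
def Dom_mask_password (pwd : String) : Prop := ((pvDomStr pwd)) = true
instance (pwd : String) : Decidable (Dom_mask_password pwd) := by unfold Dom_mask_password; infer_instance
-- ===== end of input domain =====

-- B replaces A's per-index parity branch by a loop consuming two characters per step; equivalence proved on all strings.

-- ===== PORT A =====
-- A: for index in range(0, len(pwd)): masked += "*" if index odd else pwd[index]
def mask_password (pwd : String) : String :=
  let s := pwd.toList
  let masked := (PySem.List.pyRange 0 (s.length : Int) 1).foldl
    (fun masked index =>
      if PySem.Int.mod index 2 = 1 then masked ++ ['*']
      else masked ++ (match PySem.List.pyGet? s index with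
        | some c => [c]
        | none => []))   -- index is always in range; Python would raise here
    []
  String.ofList masked

-- ===== PORT B =====
-- B's while loop consumes two characters per iteration; a final single char is kept as-is.
def maskGoB : List Char → List Char
  | c1 :: _ :: rest => c1 :: '*' :: maskGoB rest
  | rest => rest

def mask_password_alt (pwd : String) : String :=
  String.ofList (maskGoB pwd.toList)

-- ===== PRECONDITION & SPEC =====
def Spec_mask_password (pwd : String) (out : String) : Prop := out = mask_password_alt pwd
instance (pwd : String) (out : String) : Decidable (Spec_mask_password pwd out) := by unfold Spec_mask_password; infer_instance

-- ===== CLAIM (what is proved, stated in full; the proofs are below) =====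
def Claim_equal_mask_password : Prop := ∀ (pwd : String), Dom_mask_password pwd → Spec_mask_password pwd (mask_password pwd)

-- ===== LEMMAS AND PROOFS =====

def maskPiece (s : List Char) (k : Nat) : List Char :=
  if k % 2 = 1 then ['*'] else (s[k]?).toList

lemma pyRange_natCast (a n : Nat) :
    PySem.List.pyRange (a : Int) ((a : Int) + (n : Int)) 1
      = (List.range n).map (fun k => ((a + k : Nat) : Int)) := by
  induction n generalizing a with
  | zero => simp [PySem.List.pyRange]
  | succ n ih =>
    rw [PySem.List.pyRange_one_cons (by omega)]
    have : ((a : Int) + 1 : Int) = ((a + 1 : Nat) : Int) := by push_cast; ring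
    rw [show ((a : Int) + (↑(n + 1) : Int)) = ((a + 1 : Nat) : Int) + (n : Int) by push_cast; ring]
    rw [this, ih (a + 1)]
    rw [List.range_succ_eq_map]
    simp only [List.map_cons, List.map_map]
    refine List.cons_eq_cons.mpr ⟨by push_cast; ring, ?_⟩
    apply List.map_congr_left; intro k _
    simp only [Function.comp]; congr 1; omega

lemma step_eq (s : List Char) (k : Nat) :
    (if PySem.Int.mod (k : Int) 2 = 1 then ['*']
     else (match PySem.List.pyGet? s (k : Int) with
           | some c => [c]
           | none => ([] : List Char))) = maskPiece s k := by
  have hmod : PySem.Int.mod (k : Int) 2 = ((k % 2 : Nat) : Int) := by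
    simp [PySem.Int.mod, Int.fmod_eq_emod]
  rw [hmod, PySem.List.pyGet?_natCast]
  unfold maskPiece
  rcases Nat.mod_two_eq_zero_or_one k with h | h <;> simp [h] <;> cases s[k]? <;> simp [Option.toList]

lemma maskPiece_shift (c1 c2 : Char) (rest : List Char) (k : Nat) :
    maskPiece (c1 :: c2 :: rest) (2 + k) = maskPiece rest k := by
  unfold maskPiece
  have : (2 + k) % 2 = k % 2 := by omega
  rw [this]
  rcases Nat.mod_two_eq_zero_or_one k with h | h <;> simp [h, List.getElem?_cons]

lemma flatMap_range_eq_maskGoB (s : List Char) :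
    (List.range s.length).flatMap (maskPiece s) = maskGoB s := by
  induction s using maskGoB.induct with
  | case1 c1 c2 rest ih =>
    have hlen : (c1 :: c2 :: rest).length = 2 + rest.length := by simp; omega
    rw [hlen, List.range_add, List.flatMap_append, List.flatMap_map]
    have h2 : (List.range 2).flatMap (maskPiece (c1 :: c2 :: rest)) = [c1, '*'] := by
      simp [List.range_succ, maskPiece]
    rw [h2]
    have h3 : ∀ k ∈ List.range rest.length,
        maskPiece (c1 :: c2 :: rest) (2 + k) = maskPiece rest k := by
      intro k _; exact maskPiece_shift c1 c2 rest k
    rw [List.flatMap_congr h3, ih]; rfl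
  | case2 rest h =>
    cases rest with
    | nil => simp [maskGoB]
    | cons c t =>
      cases t with
      | nil => simp [List.range_succ, maskPiece, maskGoB]
      | cons d u => exact absurd rfl (h c d u)

theorem mask_password_spec : Claim_equal_mask_password := by
  intro pwd _
  unfold Spec_mask_password mask_password mask_password_alt
  have hstep : (fun (masked : List Char) (index : Int) =>
      if PySem.Int.mod index 2 = 1 then masked ++ ['*']
      else masked ++ (match PySem.List.pyGet? pwd.toList index with
        | some c => [c]
        | none => []))
    = (fun masked index => masked ++
        (if PySem.Int.mod index 2 = 1 then ['*']
         else (match PySem.List.pyGet? pwd.toList index with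
               | some c => [c]
               | none => []))) := by
    funext m i; split <;> rfl
  simp only [hstep, PySem.List.foldl_append_eq_flatMap, List.nil_append]
  have hr : PySem.List.pyRange (0 : Int) (pwd.toList.length : Int) 1
      = (List.range pwd.toList.length).map (fun k => ((0 + k : Nat) : Int)) := by
    have := pyRange_natCast 0 pwd.toList.length
    simpa using this
  rw [hr, List.flatMap_map]
  have hpt : ∀ k ∈ List.range pwd.toList.length,
      (if PySem.Int.mod (((0 + k : Nat) : Int)) 2 = 1 then ['*']
       else (match PySem.List.pyGet? pwd.toList ((0 + k : Nat) : Int) with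
             | some c => [c]
             | none => ([] : List Char))) = maskPiece pwd.toList k := by
    intro k _
    have := step_eq pwd.toList k
    simpa using this
  rw [List.flatMap_congr hpt, flatMap_range_eq_maskGoB]
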